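-- pv_equiv track=rewrite | github.com/pypi-data/pypi-mirror-397 | packages/data-transfer-lib/data_transfer_lib-0.1.2-py3-none-any.whl/data_transfer_lib/schema/validator.py | _check_type_compatibility
-- ===== SOURCE A (Python) =====
-- def _check_type_compatibility(column: str, spark_type: str, target_type: str) -> tuple[bool, str]:
--
--     # Check for numeric types compatibility
--     spark_numeric_types = {
--         "IntegerType", "LongType", "ShortType",
--         "DecimalType", "FloatType", "DoubleType"
--     }
--     is_spark_type_numeric = any(t in spark_type for t in spark_numeric_types)
--
--     target_numeric_types = {
--         "Int8", "Int16", "Int32", "Int64",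
--         "UInt8", "UInt16", "UInt32", "UInt64",
--         "Float32", "Float64"
--     }
--     is_target_type_numeric = any(t in target_type for t in target_numeric_types)
--
--     if is_spark_type_numeric and is_target_type_numeric:
--         return (True, "")
--
--     # Check for string types compatibility
--     if "String" in spark_type and "String" in target_type:
--         return (True, "")
--
--     # Check for date types compatibility
--     if "Timestamp" in spark_type and "DateTime" in target_type:
--         return (True, "")
--     if "Date" in spark_type and "Date" in target_type:
--         return (True, "")
--
--     # Check for decimal types compatibility
--     if "Decimal" in spark_type and "Decimal" in target_type:
--         return (True, "")
--
--     # Types are not compatible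
--     return (False, f"Column '{column}': uncompatible types ({spark_type} -> {target_type})")
-- ===== SOURCE B (Python) =====
-- SPARK_TAGS = [
--     ("IntegerType", "num"), ("LongType", "num"), ("ShortType", "num"),
--     ("DecimalType", "num"), ("FloatType", "num"), ("DoubleType", "num"),
--     ("String", "str"), ("Timestamp", "ts"), ("Date", "date"), ("Decimal", "dec"),
-- ]
--
-- TARGET_TAGS = [
--     ("Int8", "num"), ("Int16", "num"), ("Int32", "num"), ("Int64", "num"),
--     ("UInt8", "num"), ("UInt16", "num"), ("UInt32", "num"), ("UInt64", "num"),
--     ("Float32", "num"), ("Float64", "num"),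
--     ("String", "str"), ("DateTime", "ts"), ("Date", "date"), ("Decimal", "dec"),
-- ]
--
--
-- def _check_type_compatibility(column: str, spark_type: str, target_type: str) -> tuple[bool, str]:
--     # Classify each side independently into a set of abstract categories,
--     # then the two types are compatible iff the category sets intersect.
--     spark_tags = {tag for kw, tag in SPARK_TAGS if kw in spark_type}
--     target_tags = {tag for kw, tag in TARGET_TAGS if kw in target_type}
--     if spark_tags & target_tags:
--         return (True, "")
--     return (False, f"Column '{column}': uncompatible types ({spark_type} -> {target_type})")
-- ===== Notes on version B (the rewrite author's own statement) =====
-- stated objective: alternative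
-- what changed: Instead of A's paired chain of substring guards, B classifies each type string independently into a set of abstract categories via a keyword-to-category table per side, and declares compatibility iff the two category sets intersect.
import Mathlib
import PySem

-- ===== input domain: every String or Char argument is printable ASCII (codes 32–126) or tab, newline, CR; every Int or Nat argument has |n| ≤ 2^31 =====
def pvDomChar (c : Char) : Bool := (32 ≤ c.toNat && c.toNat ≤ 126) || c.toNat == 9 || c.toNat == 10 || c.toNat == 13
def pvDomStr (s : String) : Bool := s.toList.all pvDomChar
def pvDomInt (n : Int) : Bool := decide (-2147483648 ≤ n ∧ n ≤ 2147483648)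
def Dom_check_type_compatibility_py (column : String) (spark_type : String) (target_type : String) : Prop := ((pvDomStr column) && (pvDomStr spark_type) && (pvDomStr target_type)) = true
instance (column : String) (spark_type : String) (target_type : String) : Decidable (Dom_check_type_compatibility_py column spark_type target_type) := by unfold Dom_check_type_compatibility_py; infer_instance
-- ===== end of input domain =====

-- B classifies each type string independently into a set of abstract categories and tests whether the
-- two category sets intersect, instead of A's paired chain of substring guards (alternative; same cost).

-- ===== PORT A =====
-- literal port of A: two `any` scans over the numeric keyword sets, then the chain of ifs
def check_type_compatibility_py (column : String) (spark_type : String) (target_type : String) : Bool × String :=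
  let spark_numeric_types : List String :=
    ["IntegerType", "LongType", "ShortType", "DecimalType", "FloatType", "DoubleType"]
  let is_spark_type_numeric := spark_numeric_types.any (fun t => PySem.Str.isIn t spark_type)
  let target_numeric_types : List String :=
    ["Int8", "Int16", "Int32", "Int64", "UInt8", "UInt16", "UInt32", "UInt64", "Float32", "Float64"]
  let is_target_type_numeric := target_numeric_types.any (fun t => PySem.Str.isIn t target_type)
  if is_spark_type_numeric && is_target_type_numeric then (true, "")
  else if PySem.Str.isIn "String" spark_type && PySem.Str.isIn "String" target_type then (true, "")
  else if PySem.Str.isIn "Timestamp" spark_type && PySem.Str.isIn "DateTime" target_type then (true, "")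
  else if PySem.Str.isIn "Date" spark_type && PySem.Str.isIn "Date" target_type then (true, "")
  else if PySem.Str.isIn "Decimal" spark_type && PySem.Str.isIn "Decimal" target_type then (true, "")
  else (false, PySem.Str.join "" ["Column '", column, "': uncompatible types (", spark_type, " -> ", target_type, ")"])

-- ===== PORT B =====
-- Source B's per-side keyword → category tables
def ctcSparkTags : List (String × String) :=
  [ ("IntegerType", "num"), ("LongType", "num"), ("ShortType", "num"),
    ("DecimalType", "num"), ("FloatType", "num"), ("DoubleType", "num"),
    ("String", "str"), ("Timestamp", "ts"), ("Date", "date"), ("Decimal", "dec") ]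

def ctcTargetTags : List (String × String) :=
  [ ("Int8", "num"), ("Int16", "num"), ("Int32", "num"), ("Int64", "num"),
    ("UInt8", "num"), ("UInt16", "num"), ("UInt32", "num"), ("UInt64", "num"),
    ("Float32", "num"), ("Float64", "num"),
    ("String", "str"), ("DateTime", "ts"), ("Date", "date"), ("Decimal", "dec") ]

-- Source B's set comprehension {tag for kw, tag in table if kw in s}
def ctcTags (s : String) (table : List (String × String)) : PySem.Set String :=
  PySem.Set.ofList ((table.filter (fun p => PySem.Str.isIn p.1 s)).map Prod.snd)

def check_type_compatibility_py_alt (column : String) (spark_type : String) (target_type : String) : Bool × String :=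
  let spark_tags := ctcTags spark_type ctcSparkTags
  let target_tags := ctcTags target_type ctcTargetTags
  if PySem.Set.inter spark_tags target_tags ≠ [] then (true, "")
  else (false, PySem.Str.join "" ["Column '", column, "': uncompatible types (", spark_type, " -> ", target_type, ")"])

-- ===== PRECONDITION & SPEC =====
def Spec_check_type_compatibility_py (column : String) (spark_type : String) (target_type : String) (out : Bool × String) : Prop := out = check_type_compatibility_py_alt column spark_type target_type
instance (column : String) (spark_type : String) (target_type : String) (out : Bool × String) : Decidable (Spec_check_type_compatibility_py column spark_type target_type out) := by unfold Spec_check_type_compatibility_py; infer_instance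

-- ===== CLAIM (what is proved, stated in full; the proofs are below) =====
def Claim_equal_check_type_compatibility_py : Prop := ∀ (column : String) (spark_type : String) (target_type : String), Dom_check_type_compatibility_py column spark_type target_type → Spec_check_type_compatibility_py column spark_type target_type (check_type_compatibility_py column spark_type target_type)

-- ===== LEMMAS AND PROOFS =====

-- membership in a category set, characterised by the table rows
lemma mem_ctcTags (s : String) (table : List (String × String)) (x : String) :
    x ∈ ctcTags s table ↔ ∃ p ∈ table, PySem.Str.isIn p.1 s = true ∧ p.2 = x := by
  simp [ctcTags, PySem.Set.mem_ofList, List.mem_filter, List.mem_map]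

-- a category set only contains categories named in the table
lemma sub_ctcTags (s : String) (table : List (String × String)) (x : String)
    (h : x ∈ ctcTags s table) : x ∈ table.map Prod.snd := by
  rw [mem_ctcTags] at h
  obtain ⟨p, hp, _, he⟩ := h
  exact he ▸ List.mem_map_of_mem hp

-- per-category membership, in terms of A's substring tests
lemma spark_num (s : String) : "num" ∈ ctcTags s ctcSparkTags ↔
    (["IntegerType", "LongType", "ShortType", "DecimalType", "FloatType", "DoubleType"].any
      (fun t => PySem.Str.isIn t s)) = true := by
  rw [mem_ctcTags]; simp [ctcSparkTags]

lemma spark_str (s : String) : "str" ∈ ctcTags s ctcSparkTags ↔ PySem.Str.isIn "String" s = true := by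
  rw [mem_ctcTags]; simp [ctcSparkTags]

lemma spark_ts (s : String) : "ts" ∈ ctcTags s ctcSparkTags ↔ PySem.Str.isIn "Timestamp" s = true := by
  rw [mem_ctcTags]; simp [ctcSparkTags]

lemma spark_date (s : String) : "date" ∈ ctcTags s ctcSparkTags ↔ PySem.Str.isIn "Date" s = true := by
  rw [mem_ctcTags]; simp [ctcSparkTags]

lemma spark_dec (s : String) : "dec" ∈ ctcTags s ctcSparkTags ↔ PySem.Str.isIn "Decimal" s = true := by
  rw [mem_ctcTags]; simp [ctcSparkTags]

lemma targ_num (t : String) : "num" ∈ ctcTags t ctcTargetTags ↔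
    (["Int8", "Int16", "Int32", "Int64", "UInt8", "UInt16", "UInt32", "UInt64", "Float32", "Float64"].any
      (fun k => PySem.Str.isIn k t)) = true := by
  rw [mem_ctcTags]; simp [ctcTargetTags]

lemma targ_str (t : String) : "str" ∈ ctcTags t ctcTargetTags ↔ PySem.Str.isIn "String" t = true := by
  rw [mem_ctcTags]; simp [ctcTargetTags]

lemma targ_ts (t : String) : "ts" ∈ ctcTags t ctcTargetTags ↔ PySem.Str.isIn "DateTime" t = true := by
  rw [mem_ctcTags]; simp [ctcTargetTags]

lemma targ_date (t : String) : "date" ∈ ctcTags t ctcTargetTags ↔ PySem.Str.isIn "Date" t = true := by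
  rw [mem_ctcTags]; simp [ctcTargetTags]

lemma targ_dec (t : String) : "dec" ∈ ctcTags t ctcTargetTags ↔ PySem.Str.isIn "Decimal" t = true := by
  rw [mem_ctcTags]; simp [ctcTargetTags]

-- B's intersection test is nonempty iff some category is assigned to both sides
lemma ctc_inter_ne_nil_iff (s t : String) :
    PySem.Set.inter (ctcTags s ctcSparkTags) (ctcTags t ctcTargetTags) ≠ [] ↔
      ∃ x, x ∈ ctcTags s ctcSparkTags ∧ x ∈ ctcTags t ctcTargetTags := by
  constructor
  · intro h
    obtain ⟨x, hx⟩ := List.exists_mem_of_ne_nil _ h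
    have := (PySem.Set.mem_inter _ _ _).mp hx
    exact ⟨x, this.1, this.2⟩
  · rintro ⟨x, h1, h2⟩ hnil
    have hx : x ∈ PySem.Set.inter (ctcTags s ctcSparkTags) (ctcTags t ctcTargetTags) :=
      (PySem.Set.mem_inter _ _ _).mpr ⟨h1, h2⟩
    simp [hnil] at hx

-- the category sets intersect iff A's disjunction of guards holds
lemma ctc_cond_iff (s t : String) :
    (∃ x, x ∈ ctcTags s ctcSparkTags ∧ x ∈ ctcTags t ctcTargetTags) ↔
    ((["IntegerType", "LongType", "ShortType", "DecimalType", "FloatType", "DoubleType"].any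
        (fun k => PySem.Str.isIn k s)
      && ["Int8", "Int16", "Int32", "Int64", "UInt8", "UInt16", "UInt32", "UInt64", "Float32", "Float64"].any
        (fun k => PySem.Str.isIn k t))
     || ((PySem.Str.isIn "String" s && PySem.Str.isIn "String" t)
     || ((PySem.Str.isIn "Timestamp" s && PySem.Str.isIn "DateTime" t)
     || ((PySem.Str.isIn "Date" s && PySem.Str.isIn "Date" t)
     || (PySem.Str.isIn "Decimal" s && PySem.Str.isIn "Decimal" t))))) = true := by
  constructor
  · rintro ⟨x, h1, h2⟩
    have hx := sub_ctcTags s ctcSparkTags x h1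
    simp only [ctcSparkTags, List.map_cons, List.map_nil, List.mem_cons, List.not_mem_nil,
      or_false] at hx
    rcases hx with rfl | rfl | rfl | rfl | rfl | rfl | rfl | rfl | rfl | rfl
    · rw [spark_num] at h1; rw [targ_num] at h2; simp only [h1, h2, Bool.true_and, Bool.true_or]
    · rw [spark_num] at h1; rw [targ_num] at h2; simp only [h1, h2, Bool.true_and, Bool.true_or]
    · rw [spark_num] at h1; rw [targ_num] at h2; simp only [h1, h2, Bool.true_and, Bool.true_or]
    · rw [spark_num] at h1; rw [targ_num] at h2; simp only [h1, h2, Bool.true_and, Bool.true_or]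
    · rw [spark_num] at h1; rw [targ_num] at h2; simp only [h1, h2, Bool.true_and, Bool.true_or]
    · rw [spark_num] at h1; rw [targ_num] at h2; simp only [h1, h2, Bool.true_and, Bool.true_or]
    · rw [spark_str] at h1; rw [targ_str] at h2; simp only [h1, h2, Bool.true_and, Bool.true_or,
        Bool.or_true]
    · rw [spark_ts] at h1; rw [targ_ts] at h2; simp only [h1, h2, Bool.true_and, Bool.true_or,
        Bool.or_true]
    · rw [spark_date] at h1; rw [targ_date] at h2; simp only [h1, h2, Bool.true_and, Bool.true_or,
        Bool.or_true]
    · rw [spark_dec] at h1; rw [targ_dec] at h2; simp only [h1, h2, Bool.true_and, Bool.or_true]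
  · intro h
    simp only [Bool.or_eq_true, Bool.and_eq_true] at h
    rcases h with ⟨hs, ht⟩ | ⟨hs, ht⟩ | ⟨hs, ht⟩ | ⟨hs, ht⟩ | ⟨hs, ht⟩
    · exact ⟨"num", (spark_num s).mpr hs, (targ_num t).mpr ht⟩
    · exact ⟨"str", (spark_str s).mpr hs, (targ_str t).mpr ht⟩
    · exact ⟨"ts", (spark_ts s).mpr hs, (targ_ts t).mpr ht⟩
    · exact ⟨"date", (spark_date s).mpr hs, (targ_date t).mpr ht⟩
    · exact ⟨"dec", (spark_dec s).mpr hs, (targ_dec t).mpr ht⟩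

-- ===== VERDICT (by name: the statement is the Claim_ definition above) =====
theorem check_type_compatibility_py_spec : Claim_equal_check_type_compatibility_py := by
  intro column s t _
  simp only [Spec_check_type_compatibility_py, check_type_compatibility_py,
    check_type_compatibility_py_alt]
  by_cases hP : ∃ x, x ∈ ctcTags s ctcSparkTags ∧ x ∈ ctcTags t ctcTargetTags
  · rw [if_pos ((ctc_inter_ne_nil_iff s t).mpr hP)]
    have hb := (ctc_cond_iff s t).mp hP
    simp only [Bool.or_eq_true] at hb
    split_ifs with h1 h2 h3 h4 h5
    · rfl
    · rfl
    · rfl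
    · rfl
    · rfl
    · rcases hb with h | h | h | h | h
      · exact absurd h h1
      · exact absurd h h2
      · exact absurd h h3
      · exact absurd h h4
      · exact absurd h h5
  · rw [if_neg (fun hne => hP ((ctc_inter_ne_nil_iff s t).mp hne))]
    have hb : ¬ _ = true := fun hc => hP ((ctc_cond_iff s t).mpr hc)
    split_ifs with h1 h2 h3 h4 h5
    · exact absurd (by simp only [h1, Bool.true_or]) hb
    · exact absurd (by simp only [h2, Bool.true_or, Bool.or_true]) hb
    · exact absurd (by simp only [h3, Bool.true_or, Bool.or_true]) hb
    · exact absurd (by simp only [h4, Bool.true_or, Bool.or_true]) hb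
    · exact absurd (by simp only [h5, Bool.or_true]) hb
    · rfl
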